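-- pv_equiv track=rewrite | github.com/Giovix92/GTools-Mac | modules/mkssdt.py | find_next_hex
-- ===== SOURCE A (Python) =====
-- def is_hex(line):
-- 	return ':' in line.split('//')[0]
--
-- def get_hex(line):
-- 	# strip the header and commented end
-- 	return line.split(':')[1].split('//')[0].replace(' ','')
--
-- def find_next_hex(dsdt_lines, index=0):
-- 	# Returns the index of the next set of hex digits after the passed index
-- 	start_index = -1
-- 	end_index   = -1
-- 	old_hex = True
-- 	for i,line in enumerate(dsdt_lines[index:]):
-- 		if old_hex:
-- 			if not is_hex(line):
-- 				# Broke out of the old hex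
-- 				old_hex = False
-- 			continue
-- 		# Not old_hex territory - check if we got new hex
-- 		if is_hex(line): # Checks for a :, but not in comments
-- 			start_index = i+index
-- 			hex_text,end_index = get_hex_starting_at(dsdt_lines, start_index)
-- 			return (hex_text, start_index, end_index)
-- 	return ('',start_index,end_index)
--
-- def get_hex_starting_at(dsdt_lines, start_index):
-- 	# Returns a tuple of the hex, and the ending index
-- 	hex_text = ''
-- 	index = -1
-- 	for i,x in enumerate(dsdt_lines[start_index:]):
-- 		if not is_hex(x):
-- 			break
-- 		hex_text += get_hex(x)
-- 		index = i+start_index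
-- 	return (hex_text, index)
-- ===== SOURCE B (Python) =====
-- def is_hex(line):
-- 	return ':' in line.split('//')[0]
--
-- def get_hex(line):
-- 	return line.split(':')[1].split('//')[0].replace(' ','')
--
-- def find_next_hex(dsdt_lines, index=0):
-- 	# Single pass with an explicit phase: skip the old hex run, wait for the
-- 	# next hex line, then collect it inline (no second scan).
-- 	hex_text = ''
-- 	start_index = -1
-- 	end_index = -1
-- 	phase = 0  # 0 = inside old hex, 1 = seeking new hex, 2 = collecting
-- 	for i, line in enumerate(dsdt_lines[index:]):
-- 		hexline = is_hex(line)
-- 		if phase == 0: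
-- 			if not hexline:
-- 				phase = 1
-- 		elif phase == 1:
-- 			if hexline:
-- 				phase = 2
-- 				start_index = i + index
-- 				hex_text += get_hex(line)
-- 				end_index = i + index
-- 		else:
-- 			if not hexline:
-- 				break
-- 			hex_text += get_hex(line)
-- 			end_index = i + index
-- 	return (hex_text, start_index, end_index)
-- ===== Notes on version B (the rewrite author's own statement) =====
-- stated objective: alternative
-- what changed: Replaced A's find-then-rescan (the collector re-slices dsdt_lines[start_index:] and scans again) by one single pass with an explicit phase (skip old hex / seek / collect inline), so the found block is collected as it is traversed.
-- intended difference: When index < -len(dsdt_lines) and a hex block follows the leading hex run, A's second scan re-slices from a wrapped position and returns hex text and end index read from the wrong part of the list (often '' and -1), while B returns the text, start and end of the block it actually found; B's is the intended value. — e.g. on find_next_hex(["z", "1:a"], -7): A returns ("", -6, -1), B returns ("a", -6, -6)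
import Mathlib
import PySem

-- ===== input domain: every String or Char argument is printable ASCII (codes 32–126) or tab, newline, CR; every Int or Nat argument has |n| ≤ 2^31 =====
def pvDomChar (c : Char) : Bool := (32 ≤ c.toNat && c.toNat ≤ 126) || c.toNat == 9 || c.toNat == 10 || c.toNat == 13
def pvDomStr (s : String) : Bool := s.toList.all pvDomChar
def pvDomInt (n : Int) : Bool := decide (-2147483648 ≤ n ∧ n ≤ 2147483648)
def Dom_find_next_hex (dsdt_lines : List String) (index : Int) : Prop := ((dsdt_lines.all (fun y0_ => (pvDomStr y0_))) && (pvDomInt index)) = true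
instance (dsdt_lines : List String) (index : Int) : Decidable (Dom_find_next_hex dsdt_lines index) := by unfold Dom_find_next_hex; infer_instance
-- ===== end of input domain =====

-- B is a single pass with an explicit phase instead of A's find-then-rescan; on index < -len(dsdt_lines)
-- A rescans from a wrapped slice start and B reports the block it actually found (see D_ below).

-- ===== PORT A =====
def is_hex (line : String) : Bool :=
  PySem.Str.isIn ":" (PySem.List.pyGetD ((PySem.Str.split? line "//").getD []) 0 "")

-- [1] of split(':') exists whenever is_hex holds (a ':' occurs before any '//'); A only calls
-- get_hex on such lines, so the default of pyGetD is never taken on any reachable call.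
def get_hex (line : String) : String :=
  PySem.Str.replace
    (PySem.List.pyGetD ((PySem.Str.split? (PySem.List.pyGetD ((PySem.Str.split? line ":").getD []) 1 "") "//").getD []) 0 "")
    " " ""

-- the for-loop of get_hex_starting_at (i enumerates the slice; break on non-hex)
def ghsaLoop (lines : List String) (i : Nat) (start_index : Int) (hex_text : String) (idx : Int) : String × Int :=
  match lines with
  | [] => (hex_text, idx)
  | x :: rest =>
    if !is_hex x then (hex_text, idx)
    else ghsaLoop rest (i + 1) start_index (hex_text ++ get_hex x) ((i : Int) + start_index)

def get_hex_starting_at (dsdt_lines : List String) (start_index : Int) : String × Int :=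
  ghsaLoop (PySem.List.slice dsdt_lines (some start_index) none) 0 start_index "" (-1)

-- the for-loop of find_next_hex (early return on the found block)
def fnhLoop (lines : List String) (dsdt_lines : List String) (index : Int) (i : Nat) (old_hex : Bool) : String × Int × Int :=
  match lines with
  | [] => ("", -1, -1)
  | line :: rest =>
    if old_hex then
      fnhLoop rest dsdt_lines index (i + 1) (if !is_hex line then false else true)
    else if is_hex line then
      let start_index : Int := (i : Int) + index
      let r := get_hex_starting_at dsdt_lines start_index
      (r.1, start_index, r.2)
    else
      fnhLoop rest dsdt_lines index (i + 1) false

def find_next_hex (dsdt_lines : List String) (index : Int) : String × Int × Int :=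
  fnhLoop (PySem.List.slice dsdt_lines (some index) none) dsdt_lines index 0 true

-- ===== PORT B =====
def is_hex_b (line : String) : Bool :=
  PySem.Str.isIn ":" (PySem.List.pyGetD ((PySem.Str.split? line "//").getD []) 0 "")

def get_hex_b (line : String) : String :=
  PySem.Str.replace
    (PySem.List.pyGetD ((PySem.Str.split? (PySem.List.pyGetD ((PySem.Str.split? line ":").getD []) 1 "") "//").getD []) 0 "")
    " " ""

-- the single for-loop of B: phase 0 = inside old hex, 1 = seeking new hex, 2 = collecting
def fnhAltLoop (lines : List String) (index : Int) (i : Nat) (phase : Nat)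
    (hex_text : String) (start_index end_index : Int) : String × Int × Int :=
  match lines with
  | [] => (hex_text, start_index, end_index)
  | line :: rest =>
    let hexline := is_hex_b line
    if phase = 0 then
      fnhAltLoop rest index (i + 1) (if !hexline then 1 else 0) hex_text start_index end_index
    else if phase = 1 then
      if hexline then
        fnhAltLoop rest index (i + 1) 2 (hex_text ++ get_hex_b line) ((i : Int) + index) ((i : Int) + index)
      else
        fnhAltLoop rest index (i + 1) 1 hex_text start_index end_index
    else
      if !hexline then (hex_text, start_index, end_index)
      else fnhAltLoop rest index (i + 1) 2 (hex_text ++ get_hex_b line) start_index ((i : Int) + index)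

def find_next_hex_alt (dsdt_lines : List String) (index : Int) : String × Int × Int :=
  fnhAltLoop (PySem.List.slice dsdt_lines (some index) none) index 0 0 "" (-1) (-1)

-- ===== PRECONDITION & SPEC =====
-- hex-line shape predicate used only by D_ (stated via the first "//" position, independently of the ports' split-based code; proved equal to is_hex below)
def pvHexLine (line : String) : Bool :=
  decide ((':' : Char) ∈ (if PySem.Chars.find line.toList ['/', '/'] = -1 then line.toList
    else line.toList.take (PySem.Chars.find line.toList ['/', '/']).toNat))

-- On inputs with index < -len(dsdt_lines) that contain a hex block after the leading hex run, A's second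
-- scan re-slices dsdt_lines[start_index:] from a wrapped (clamped) position and so returns hex text and an
-- end index read from the wrong part of the list, while B returns the text and end index of the block it
-- actually found; B's value is the intended one.
def D_find_next_hex (dsdt_lines : List String) (index : Int) : Prop :=
  index < -(dsdt_lines.length : Int) ∧ ((dsdt_lines.dropWhile pvHexLine).any pvHexLine) = true
instance (dsdt_lines : List String) (index : Int) : Decidable (D_find_next_hex dsdt_lines index) := by
  unfold D_find_next_hex; infer_instance

def Spec_find_next_hex (dsdt_lines : List String) (index : Int) (out : String × Int × Int) : Prop :=
  ¬ D_find_next_hex dsdt_lines index → out = find_next_hex_alt dsdt_lines index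
instance (dsdt_lines : List String) (index : Int) (out : String × Int × Int) : Decidable (Spec_find_next_hex dsdt_lines index out) := by
  unfold Spec_find_next_hex; infer_instance

def pvDiffWitness_find_next_hex : List String × Int := (["z", "1:a"], -7)
def pvDiffWitnessOut_find_next_hex : (String × Int × Int) × (String × Int × Int) :=
  (("", -6, -1), ("a", -6, -6))

-- ===== CLAIM (what is proved, stated in full; the proofs are below) =====
def Claim_unchanged_find_next_hex : Prop := ∀ (dsdt_lines : List String) (index : Int), Dom_find_next_hex dsdt_lines index → Spec_find_next_hex dsdt_lines index (find_next_hex dsdt_lines index)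
def Claim_changed_find_next_hex : Prop := Dom_find_next_hex (pvDiffWitness_find_next_hex.1) (pvDiffWitness_find_next_hex.2) ∧ D_find_next_hex (pvDiffWitness_find_next_hex.1) (pvDiffWitness_find_next_hex.2) ∧ find_next_hex (pvDiffWitness_find_next_hex.1) (pvDiffWitness_find_next_hex.2) = pvDiffWitnessOut_find_next_hex.1 ∧ find_next_hex_alt (pvDiffWitness_find_next_hex.1) (pvDiffWitness_find_next_hex.2) = pvDiffWitnessOut_find_next_hex.2 ∧ pvDiffWitnessOut_find_next_hex.1 ≠ pvDiffWitnessOut_find_next_hex.2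

-- ===== LEMMAS AND PROOFS =====

theorem is_hex_b_eq (line : String) : is_hex_b line = is_hex line := rfl
theorem get_hex_b_eq (line : String) : get_hex_b line = get_hex line := rfl

-- first-occurrence index of sep as a structural recursion
def fo (sep : List Char) : List Char → Nat
  | [] => 0
  | c :: rest => if sep.isPrefixOf (c :: rest) then 0 else fo sep rest + 1

theorem fo_not_prefix (sep : List Char) (l : List Char) :
    ∀ j < fo sep l, ¬ sep <+: l.drop j := by
  induction l with
  | nil => simp [fo]
  | cons c rest ih =>
    intro j hj
    simp only [fo] at hj
    split at hj
    · omega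
    · cases j with
      | zero =>
        simpa [List.isPrefixOf_iff_prefix] using ‹¬ sep.isPrefixOf (c :: rest) = true›
      | succ j' => exact ih j' (by omega)

theorem fo_cases (sep : List Char) (hsep : sep ≠ []) (l : List Char) :
    sep <+: l.drop (fo sep l) ∨ (fo sep l = l.length ∧ ∀ j, ¬ sep <+: l.drop j) := by
  induction l with
  | nil =>
    right
    refine ⟨rfl, fun j => ?_⟩
    simp only [List.drop_nil]
    intro h
    exact hsep (List.prefix_nil.mp h)
  | cons c rest ih =>
    by_cases hp : sep.isPrefixOf (c :: rest)
    · left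
      have hp' : sep <+: c :: rest := List.isPrefixOf_iff_prefix.mp hp
      simpa [fo, hp] using hp'
    · rcases ih with h | ⟨hlen, hnone⟩
      · left
        simpa [fo, hp] using h
      · right
        refine ⟨by simp [fo, hp, hlen], fun j => ?_⟩
        cases j with
        | zero => simpa [List.isPrefixOf_iff_prefix] using hp
        | succ j' => simpa using hnone j'

theorem fo_eq_find (sep : List Char) (hsep : sep ≠ []) (l : List Char) :
    fo sep l = if PySem.Chars.find l sep = -1 then l.length else (PySem.Chars.find l sep).toNat := by
  rcases eq_or_ne (PySem.Chars.find l sep) (-1) with hf | hf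
  · rw [if_pos hf]
    have hni : ¬ sep <:+: l := (PySem.Chars.find_eq_neg_one_iff _ _).mp hf
    rcases fo_cases sep hsep l with h | ⟨hlen, _⟩
    · exact absurd (List.infix_iff_prefix_suffix.mpr ⟨_, h, List.drop_suffix _ _⟩) (by
        exact fun hh => hni (by
          rcases List.infix_iff_prefix_suffix.mp hh with ⟨t, ht1, ht2⟩
          exact List.IsInfix.trans (List.infix_iff_prefix_suffix.mpr ⟨t, ht1, ht2⟩) (List.infix_refl l)))
    · exact hlen
  · rw [if_neg hf]
    have h0 : 0 ≤ PySem.Chars.find l sep := by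
      have := PySem.Chars.neg_one_le_find l sep
      omega
    obtain ⟨hpre, hmin⟩ := PySem.Chars.find_spec h0
    rcases fo_cases sep hsep l with h | ⟨_, hnone⟩
    · have h1 : (PySem.Chars.find l sep).toNat ≤ fo sep l := by
        by_contra hc
        exact hmin _ (by omega) h
      have h2 : fo sep l ≤ (PySem.Chars.find l sep).toNat := by
        by_contra hc
        exact fo_not_prefix sep l _ (by omega) hpre
      omega
    · exact absurd hpre (hnone _)

theorem go_acc (sep : List Char) (fuel : Nat) :
    ∀ (l cur : List Char) (acc : List (List Char)),
      PySem.Chars.splitOn.go sep fuel l cur acc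
        = acc.reverse ++ PySem.Chars.splitOn.go sep fuel l cur [] := by
  induction fuel with
  | zero => intro l cur acc; simp [PySem.Chars.splitOn.go]
  | succ f ih =>
    intro l cur acc
    cases l with
    | nil => simp [PySem.Chars.splitOn.go]
    | cons c rest =>
      by_cases hp : sep.isPrefixOf (c :: rest)
      · simp only [PySem.Chars.splitOn.go, hp, if_pos]
        rw [ih _ _ (cur.reverse :: acc), ih _ _ [cur.reverse]]
        simp
      · simp only [PySem.Chars.splitOn.go, hp, Bool.false_eq_true, if_false]
        exact ih _ _ acc

theorem go_head (sep : List Char) : ∀ (l : List Char) (fuel : Nat) (cur : List Char),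
    l.length < fuel →
    (PySem.Chars.splitOn.go sep fuel l cur []).headD [] = cur.reverse ++ l.take (fo sep l) := by
  intro l
  induction l with
  | nil =>
    intro fuel cur h
    cases fuel with
    | zero => omega
    | succ f => simp [PySem.Chars.splitOn.go, fo]
  | cons c rest ih =>
    intro fuel cur h
    cases fuel with
    | zero => omega
    | succ f =>
      by_cases hp : sep.isPrefixOf (c :: rest)
      · simp only [PySem.Chars.splitOn.go, hp, if_pos]
        rw [go_acc]
        simp [fo, hp]
      · simp only [PySem.Chars.splitOn.go, hp, Bool.false_eq_true, if_false]
        rw [ih f (c :: cur) (by simpa using Nat.lt_of_succ_lt_succ h)]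
        simp [fo, hp]

theorem mem_singleton_infix (a : Char) (l : List Char) : [a] <:+: l ↔ a ∈ l := by
  constructor
  · intro ⟨s, t, hst⟩
    subst hst; simp
  · intro h
    obtain ⟨s, t, rfl⟩ := List.append_of_mem h
    exact ⟨s, t, by simp⟩

theorem isIn_colon_eq (t : List Char) :
    PySem.Str.isIn ":" (String.ofList t) = decide ((':' : Char) ∈ t) := by
  have h1 : PySem.Str.isIn ":" (String.ofList t) = PySem.Chars.isIn [':'] t := by
    simp [PySem.Str.isIn]
  rw [h1]
  by_cases hm : (':' : Char) ∈ t
  · simp [hm, (PySem.Chars.isIn_iff_infix _ _).mpr ((mem_singleton_infix _ _).mpr hm)]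
  · simp only [hm, decide_false]
    cases hb : PySem.Chars.isIn [':'] t
    · rfl
    · exact absurd ((mem_singleton_infix _ _).mp ((PySem.Chars.isIn_iff_infix _ _).mp hb)) hm

theorem pvHexLine_eq_is_hex (line : String) : pvHexLine line = is_hex line := by
  have hsplit : PySem.Str.split? line "//"
      = some (List.map String.ofList (PySem.Chars.splitOn line.toList ['/', '/'])) := by
    simp [PySem.Str.split?, PySem.Chars.split?]
  have hhead : (PySem.Chars.splitOn line.toList ['/', '/']).headD []
      = line.toList.take (fo ['/', '/'] line.toList) := by
    have := go_head ['/', '/'] line.toList (line.toList.length + 1) [] (by omega)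
    simpa [PySem.Chars.splitOn] using this
  have hpy : PySem.List.pyGetD (List.map String.ofList (PySem.Chars.splitOn line.toList ['/', '/'])) 0 ""
      = String.ofList ((PySem.Chars.splitOn line.toList ['/', '/']).headD []) := by
    cases hp : PySem.Chars.splitOn line.toList ['/', '/'] with
    | nil => simp [PySem.List.pyGetD, PySem.List.pyGet?]
    | cons x xs => simp [PySem.List.pyGetD_zero]
  unfold pvHexLine is_hex
  rw [hsplit, Option.getD_some, hpy, hhead, isIn_colon_eq]
  rw [fo_eq_find ['/', '/'] (by simp) line.toList]
  rcases eq_or_ne (PySem.Chars.find line.toList ['/', '/']) (-1) with hf | hf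
  · rw [if_pos hf, if_pos hf]
    rw [List.take_length]
  · simp [hf]


-- collector equivalence: A's rescanning loop equals B's inline phase-2 loop on the same tail
theorem collect_eq (rest : List String) : ∀ (j i : Nat) (index si : Int) (text : String) (e : Int),
    (i : Int) + index = (j : Int) + si →
    fnhAltLoop rest index i 2 text si e = ((ghsaLoop rest j si text e).1, si, (ghsaLoop rest j si text e).2) := by
  induction rest with
  | nil => intro j i index si text e h; simp [fnhAltLoop, ghsaLoop]
  | cons x r ih =>
    intro j i index si text e h
    by_cases hx : is_hex x
    · simp only [fnhAltLoop, ghsaLoop, is_hex_b_eq, get_hex_b_eq, hx, Bool.not_true,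
        Bool.false_eq_true, if_false]
      norm_num
      rw [h, ih (j + 1) (i + 1) index si (text ++ get_hex x) ((j : Int) + si)
            (by push_cast at h ⊢; omega)]
    · simp [fnhAltLoop, ghsaLoop, is_hex_b_eq, hx]

-- clamp arithmetic: inside the slice, re-slicing at i+index drops exactly clampIdx len index + i
theorem clamp_step (len : Nat) (index : Int) (i : Nat)
    (hge : -(len : Int) ≤ index) (hlt : PySem.List.clampIdx len index + i < len) :
    PySem.List.clampIdx len ((i : Int) + index) = PySem.List.clampIdx len index + i := by
  rcases le_or_gt 0 index with hpos | hneg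
  · obtain ⟨k, rfl⟩ := Int.eq_ofNat_of_zero_le hpos
    have h1 : PySem.List.clampIdx len (k : Int) = min k len := PySem.List.clampIdx_natCast ..
    have h2 : ((i : Int) + (k : Int)) = ((i + k : Nat) : Int) := by push_cast; ring
    rw [h2, PySem.List.clampIdx_natCast]
    omega
  · obtain ⟨k, hk, rfl⟩ : ∃ k : Nat, 0 < k ∧ index = -(k : Int) := by
      refine ⟨(-index).toNat, by omega, by omega⟩
    have h1 : PySem.List.clampIdx len (-(k : Int)) = len - k := PySem.List.clampIdx_neg_natCast _ _ hk
    rw [h1] at hlt ⊢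
    have hkl : k ≤ len := by omega
    rcases le_or_gt k i with hik | hik
    · have : (i : Int) + -(k : Int) = ((i - k : Nat) : Int) := by omega
      rw [this, PySem.List.clampIdx_natCast]; omega
    · have : (i : Int) + -(k : Int) = -(((k - i : Nat)) : Int) := by omega
      rw [this, PySem.List.clampIdx_neg_natCast _ _ (by omega)]; omega

-- main loop equivalence for index ≥ -len: paired states (old_hex=true, phase=0) and (old_hex=false, phase=1)
theorem loop_eq (dsdt_lines : List String) (index : Int)
    (hge : -(dsdt_lines.length : Int) ≤ index) :
    ∀ (rest : List String) (i : Nat),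
      dsdt_lines.drop (PySem.List.clampIdx dsdt_lines.length index + i) = rest →
      fnhLoop rest dsdt_lines index i true = fnhAltLoop rest index i 0 "" (-1) (-1) ∧
      fnhLoop rest dsdt_lines index i false = fnhAltLoop rest index i 1 "" (-1) (-1) := by
  intro rest
  induction rest with
  | nil => intro i _; constructor <;> simp [fnhLoop, fnhAltLoop]
  | cons line rest' ih =>
    intro i hdrop
    have hlen : PySem.List.clampIdx dsdt_lines.length index + i < dsdt_lines.length := by
      by_contra h
      rw [List.drop_eq_nil_of_le (by omega)] at hdrop
      exact List.cons_ne_nil _ _ hdrop.symm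
    have hdrop' : dsdt_lines.drop (PySem.List.clampIdx dsdt_lines.length index + (i + 1)) = rest' := by
      have : PySem.List.clampIdx dsdt_lines.length index + (i + 1)
           = (PySem.List.clampIdx dsdt_lines.length index + i) + 1 := by omega
      rw [this, ← List.drop_drop, hdrop]
      rfl
    obtain ⟨ih0, ih1⟩ := ih (i + 1) hdrop'
    by_cases hx : is_hex line
    · constructor
      · simp only [fnhLoop, fnhAltLoop, is_hex_b_eq, hx, Bool.not_true, reduceIte]
        exact ih0
      · -- found the new block: A rescans dsdt_lines[(i+index):], which is exactly line :: rest'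
        have hslice : PySem.List.slice dsdt_lines (some ((i : Int) + index)) none = line :: rest' := by
          rw [PySem.List.slice_some_none, clamp_step _ _ _ hge hlen, hdrop]
        have hg : get_hex_starting_at dsdt_lines ((i : Int) + index)
            = ghsaLoop rest' 1 ((i : Int) + index) ("" ++ get_hex line) ((i : Int) + index) := by
          rw [get_hex_starting_at, hslice]
          simp [ghsaLoop, hx]
        have hc := collect_eq rest' 1 (i + 1) index ((i : Int) + index) ("" ++ get_hex line)
          ((i : Int) + index) (by push_cast; ring)
        simp only [fnhLoop, fnhAltLoop, is_hex_b_eq, get_hex_b_eq, hx, hg, hc]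
        norm_num
    · constructor
      · simp only [fnhLoop, fnhAltLoop, is_hex_b_eq, hx, Bool.not_false, reduceIte]
        exact ih1
      · simp only [fnhLoop, fnhAltLoop, is_hex_b_eq, hx, Bool.not_false, reduceIte,
          Bool.false_eq_true, if_false]
        exact ih1

-- no-block lemmas
theorem noHex_loops (l : List String) : ∀ (d : List String) (index : Int) (i : Nat),
    l.any is_hex = false →
    fnhLoop l d index i false = ("", -1, -1) ∧ fnhAltLoop l index i 1 "" (-1) (-1) = ("", -1, -1) := by
  induction l with
  | nil => intro d index i _; constructor <;> simp [fnhLoop, fnhAltLoop]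
  | cons x r ih =>
    intro d index i hany
    simp only [List.any_cons, Bool.or_eq_false_iff] at hany
    obtain ⟨hx, hr⟩ := hany
    obtain ⟨ih0, ih1⟩ := ih d index (i + 1) hr
    constructor
    · simp only [fnhLoop, hx, Bool.false_eq_true, if_false]; exact ih0
    · simp only [fnhAltLoop, is_hex_b_eq, hx, Bool.not_false, reduceIte, Bool.false_eq_true, if_false]
      exact ih1

theorem noBlock_loops (l : List String) : ∀ (d : List String) (index : Int) (i : Nat),
    (l.dropWhile is_hex).any is_hex = false →
    fnhLoop l d index i true = ("", -1, -1) ∧ fnhAltLoop l index i 0 "" (-1) (-1) = ("", -1, -1) := by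
  induction l with
  | nil => intro d index i _; constructor <;> simp [fnhLoop, fnhAltLoop]
  | cons x r ih =>
    intro d index i hp
    by_cases hx : is_hex x
    · rw [List.dropWhile_cons_of_pos hx] at hp
      obtain ⟨ih0, ih1⟩ := ih d index (i + 1) hp
      constructor
      · simp only [fnhLoop, hx, Bool.not_true, reduceIte]; exact ih0
      · simp only [fnhAltLoop, is_hex_b_eq, hx, Bool.not_true, reduceIte]; exact ih1
    · rw [List.dropWhile_cons_of_neg (by simp [hx])] at hp
      simp only [List.any_cons, Bool.or_eq_false_iff] at hp
      obtain ⟨ih0, ih1⟩ := noHex_loops r d index (i + 1) hp.2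
      constructor
      · simp only [fnhLoop, hp.1, Bool.not_false, reduceIte]; exact ih0
      · simp only [fnhAltLoop, is_hex_b_eq, hp.1, Bool.not_false, reduceIte]; exact ih1

theorem noBlock_tail (l : List String) (h : (l.dropWhile is_hex).any is_hex = false) :
    (l.tail.dropWhile is_hex).any is_hex = false := by
  cases l with
  | nil => simp
  | cons x r =>
    simp only [List.tail_cons]
    by_cases hx : is_hex x
    · rw [List.dropWhile_cons_of_pos hx] at h; exact h
    · rw [List.dropWhile_cons_of_neg (by simp [hx])] at h
      simp only [List.any_cons, Bool.or_eq_false_iff] at h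
      rw [List.any_eq_false] at h ⊢
      exact fun y hy => h.2 y ((List.dropWhile_sublist _).mem hy)

theorem noBlock_drop (l : List String) (p : Nat) (h : (l.dropWhile is_hex).any is_hex = false) :
    ((l.drop p).dropWhile is_hex).any is_hex = false := by
  induction p with
  | zero => exact h
  | succ n ih =>
    rw [← List.tail_drop]
    exact noBlock_tail _ ih

-- ===== VERDICT (by name: the statement is the Claim_ definition above) =====
theorem find_next_hex_spec : Claim_unchanged_find_next_hex := by
  intro dsdt_lines index _ hD
  unfold find_next_hex find_next_hex_alt
  rw [PySem.List.slice_some_none]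
  by_cases hge : -(dsdt_lines.length : Int) ≤ index
  · have := (loop_eq dsdt_lines index hge (dsdt_lines.drop (PySem.List.clampIdx dsdt_lines.length index + 0)) 0 rfl).1
    simpa using this
  · have hblock : (dsdt_lines.dropWhile is_hex).any is_hex = false := by
      by_contra hb
      exact hD ⟨by omega, by
        have : pvHexLine = is_hex := funext pvHexLine_eq_is_hex
        rw [this]
        revert hb; simp⟩
    have h1 := noBlock_loops (dsdt_lines.drop (PySem.List.clampIdx dsdt_lines.length index))
      dsdt_lines index 0 (noBlock_drop _ _ hblock)
    rw [h1.1, h1.2]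

theorem find_next_hex_changed : Claim_changed_find_next_hex := by
  unfold Claim_changed_find_next_hex; decide
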